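-- pv_equiv track=rewrite | github.com/ndag/diameter-critical | process_results.py | subset_pairs_with_common_elements
-- ===== SOURCE A (Python) =====
-- def subset_pairs_with_common_elements(S):
--     count = 0
--     for i in range(len(S)):
--         for j in range(i+1, len(S)):
--             common_elements = len(set(S[i]).intersection(set(S[j])))
--             if common_elements >= 3:
--                 count += 1
--     return count
-- ===== SOURCE B (Python) =====
-- def subset_pairs_with_common_elements(S):
--     # Inverted index: element -> indices of subsets containing it (increasing).
--     postings = {}
--     for i, subset in enumerate(S):
--         for x in set(subset):
--             postings.setdefault(x, []).append(i)
--     # Element-driven accumulation: each element contributes 1 to every pair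
--     # of subsets that share it, so pair_count[(i, j)] = |set(S[i]) & set(S[j])|.
--     pair_count = {}
--     for ids in postings.values():
--         for a, i in enumerate(ids):
--             for j in ids[a + 1:]:
--                 pair_count[(i, j)] = pair_count.get((i, j), 0) + 1
--     count = 0
--     for c in pair_count.values():
--         if c >= 3:
--             count += 1
--     return count
-- ===== Notes on version B (the rewrite author's own statement) =====
-- stated objective: faster
-- what changed: Replaces the pairwise double loop that rebuilds both sets and intersects them for every pair with an inverted index (element -> subset indices) whose posting lists drive a pair counter, so only pairs that actually share an element are ever touched.
import Mathlib
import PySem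

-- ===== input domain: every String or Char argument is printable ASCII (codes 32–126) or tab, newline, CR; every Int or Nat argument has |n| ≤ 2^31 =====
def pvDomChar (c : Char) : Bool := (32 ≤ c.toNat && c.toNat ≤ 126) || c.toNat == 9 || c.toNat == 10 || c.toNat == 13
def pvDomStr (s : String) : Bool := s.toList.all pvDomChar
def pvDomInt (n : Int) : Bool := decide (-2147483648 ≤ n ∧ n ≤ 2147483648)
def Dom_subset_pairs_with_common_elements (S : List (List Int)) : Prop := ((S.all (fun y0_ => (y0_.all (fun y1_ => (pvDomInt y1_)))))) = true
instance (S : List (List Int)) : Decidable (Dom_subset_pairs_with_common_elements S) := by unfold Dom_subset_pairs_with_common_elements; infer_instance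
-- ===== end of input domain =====

-- B replaces A's pairwise double loop (which rebuilds both sets and intersects them for
-- every pair) with an inverted index element -> subset indices whose posting lists feed a
-- pair counter; only pairs actually sharing an element are touched (objective: faster).

-- ===== PORT A =====
def subset_pairs_with_common_elements (S : List (List Int)) : Int :=
  (PySem.List.pyRange 0 (S.length : Int) 1).foldl (fun count i =>
    (PySem.List.pyRange (i + 1) (S.length : Int) 1).foldl (fun count j =>
      let common : Int :=
        PySem.Set.len (PySem.Set.inter (PySem.Set.ofList (PySem.List.pyGetD S i []))
          (PySem.Set.ofList (PySem.List.pyGetD S j [])))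
      if common ≥ 3 then count + 1 else count) count) 0

-- ===== PORT B =====
def subset_pairs_with_common_elements_alt (S : List (List Int)) : Int :=
  -- postings : inverted index, element -> indices of subsets containing it
  let postings : PySem.Dict Int (List Int) :=
    (PySem.List.enumerate S).foldl (fun d p =>
      (PySem.Set.ofList p.2).foldl (fun d x => d.modify x [] (fun l => l ++ [p.1])) d)
      PySem.Dict.empty
  -- pair_count[(i, j)] accumulates one per shared element
  let pair_count : PySem.Dict (Int × Int) Int :=
    postings.values.foldl (fun (pc : PySem.Dict (Int × Int) Int) ids =>
      (PySem.List.enumerate ids).foldl (fun pc q =>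
        (PySem.List.slice ids (some (q.1 + 1)) none).foldl (fun pc j =>
          pc.insert (q.2, j) (pc.getD (q.2, j) 0 + 1)) pc) pc)
      PySem.Dict.empty
  pair_count.values.foldl (fun count c => if c ≥ 3 then count + 1 else count) 0

-- ===== PRECONDITION & SPEC =====
def Spec_subset_pairs_with_common_elements (S : List (List Int)) (out : Int) : Prop := out = subset_pairs_with_common_elements_alt S
instance (S : List (List Int)) (out : Int) : Decidable (Spec_subset_pairs_with_common_elements S out) := by unfold Spec_subset_pairs_with_common_elements; infer_instance

-- ===== CLAIM (what is proved, stated in full; the proofs are below) =====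
def Claim_equal_subset_pairs_with_common_elements : Prop := ∀ (S : List (List Int)), Dom_subset_pairs_with_common_elements S → Spec_subset_pairs_with_common_elements S (subset_pairs_with_common_elements S)

-- ===== LEMMAS AND PROOFS =====

-- pairs (l[a], l[b]) with a < b, structurally
def pvPairs : List Int → List (Int × Int)
  | [] => []
  | x :: xs => xs.map (fun y => (x, y)) ++ pvPairs xs

-- indices (in increasing order) of the subsets of S that contain e
def pvPosts (S : List (List Int)) (e : Int) : List Int :=
  ((PySem.List.enumerate S).filter (fun p => decide (e ∈ p.2))).map (fun p => p.1)

-- the distinct elements occurring in S, in first-occurrence order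
def pvElems (S : List (List Int)) : List Int :=
  PySem.Set.ofList ((PySem.List.enumerate S).flatMap (fun p => (PySem.Set.ofList p.2 : List Int)))

-- the multiset of incidence pairs B counts
def pvK (S : List (List Int)) : List (Int × Int) :=
  (pvElems S).flatMap (fun e => pvPairs (pvPosts S e))

-- number of distinct common elements of S[i] and S[j]
def pvCnt (S : List (List Int)) (i j : Int) : Nat :=
  (PySem.Set.ofList (PySem.List.pyGetD S i [])).countP
    (fun e => decide (e ∈ PySem.List.pyGetD S j []))

def pvAllPairs (n : Int) : List (Int × Int) :=
  (PySem.List.pyRange 0 n 1).flatMap (fun i =>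
    (PySem.List.pyRange (i + 1) n 1).map (fun j => (i, j)))

-- ---- math core ----
theorem pvPosts_mem (S : List (List Int)) (e i : Int) :
    i ∈ pvPosts S e ↔ ∃ k : Nat, k < S.length ∧ i = (k : Int) ∧ e ∈ S.getD k [] := by
  unfold pvPosts
  simp only [List.mem_map, List.mem_filter, PySem.List.mem_enumerate_iff]
  constructor
  · rintro ⟨p, ⟨⟨k, hk, rfl⟩, hp⟩, rfl⟩
    exact ⟨k, hk, by simp, by simpa [List.getD_eq_getElem?_getD, hk] using (of_decide_eq_true hp)⟩
  · rintro ⟨k, hk, rfl, he⟩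
    exact ⟨((k : Int), S[k]), ⟨⟨k, hk, by simp⟩, by simpa [List.getD_eq_getElem?_getD, hk] using he⟩, rfl⟩

theorem pvPosts_pairwise (S : List (List Int)) (e : Int) :
    (pvPosts S e).Pairwise (· < ·) := by
  unfold pvPosts
  exact (((PySem.List.pairwise_lt_enumerate S 0).filter _).map _ (by intro a b h; exact h))

theorem pvPairs_count (l : List Int) (h : l.Pairwise (· < ·)) (q : Int × Int) :
    (pvPairs l).count q = if q.1 ∈ l ∧ q.2 ∈ l ∧ q.1 < q.2 then 1 else 0 := by
  obtain ⟨a, b⟩ := q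
  induction l with
  | nil => simp [pvPairs]
  | cons x xs ih =>
    rw [List.pairwise_cons] at h
    have hx : x ∉ xs := fun hm => absurd (h.1 x hm) (lt_irrefl x)
    have hnd : xs.Nodup := h.2.imp (fun {u v} huv => ne_of_lt huv)
    simp only [pvPairs, List.count_append, ih h.2, List.mem_cons]
    have hmap : (xs.map (fun y => (x, y))).count (a, b) =
        if a = x ∧ b ∈ xs then 1 else 0 := by
      by_cases ha : a = x
      · subst ha
        rw [List.count_map_of_injective _ _ (fun u v huv => by simpa using huv)]
        by_cases hb : b ∈ xs
        · simp [hb, List.count_eq_one_of_mem hnd hb]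
        · simp [hb, List.count_eq_zero_of_not_mem hb]
      · rw [List.count_eq_zero_of_not_mem]
        · simp [ha]
        · intro hmem
          obtain ⟨y, _, hy⟩ := List.mem_map.mp hmem
          have hfst := congrArg Prod.fst hy
          simp at hfst
          exact ha hfst.symm
    rw [hmap]
    by_cases ha : a = x
    · subst ha
      by_cases hb : b ∈ xs
      · have := h.1 b hb
        simp [hb, hx, this]
      · by_cases hbx : b = a
        · subst hbx
          simp [hb]
        · simp [hb, hx, hbx]
    · by_cases hax : a ∈ xs
      · by_cases hbx : b = x
        · subst hbx
          have : ¬ a < b := fun hlt => absurd (h.1 a hax) (by omega)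
          simp [ha, hax, hx, this]
        · simp [ha, hax, hbx]
      · simp [ha, hax]

theorem pvK_count (S : List (List Int)) (q : Int × Int) :
    (pvK S).count q =
      (pvElems S).countP
        (fun e => decide (q.1 ∈ pvPosts S e ∧ q.2 ∈ pvPosts S e ∧ q.1 < q.2)) := by
  unfold pvK
  rw [List.count_flatMap]
  rw [List.map_congr_left (fun e _ => by
    show (List.count q ∘ fun e => pvPairs (pvPosts S e)) e = _
    simp only [Function.comp_apply]
    rw [pvPairs_count _ (pvPosts_pairwise S e) q])]
  rw [← PySem.List.sum_map_ite_one_zero_nat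
    (fun e => decide (q.1 ∈ pvPosts S e ∧ q.2 ∈ pvPosts S e ∧ q.1 < q.2)) (pvElems S)]
  simp

theorem pvElems_mem (S : List (List Int)) (e : Int) :
    e ∈ pvElems S ↔ ∃ k : Nat, k < S.length ∧ e ∈ S.getD k [] := by
  unfold pvElems
  simp only [PySem.Set.mem_ofList, List.mem_flatMap, PySem.List.mem_enumerate_iff]
  constructor
  · rintro ⟨p, ⟨k, hk, rfl⟩, hp⟩
    exact ⟨k, hk, by simpa [List.getD_eq_getElem?_getD, hk] using hp⟩
  · rintro ⟨k, hk, he⟩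
    exact ⟨((k : Int), S[k]), ⟨k, hk, by simp⟩, by simpa [PySem.Set.mem_ofList, List.getD_eq_getElem?_getD, hk] using he⟩

theorem pvPosts_mem_range (S : List (List Int)) (e i : Int)
    (h0 : 0 ≤ i) (hn : i < S.length) :
    i ∈ pvPosts S e ↔ e ∈ S.getD i.toNat [] := by
  rw [pvPosts_mem]
  constructor
  · rintro ⟨k, hk, rfl, he⟩
    simpa using he
  · intro he
    exact ⟨i.toNat, by omega, (Int.toNat_of_nonneg h0).symm, he⟩

-- in-range pairs: the count is the distinct-common-element count
theorem pvK_count_eq_cnt (S : List (List Int)) (i j : Int)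
    (hi : 0 ≤ i) (hij : i < j) (hj : j < S.length) :
    (pvK S).count (i, j) = pvCnt S i j := by
  have hjn : 0 ≤ j := by omega
  have hin : i < S.length := by omega
  rw [pvK_count]
  have hgi : PySem.List.pyGetD S i [] = S.getD i.toNat [] := by
    rw [PySem.List.pyGetD_eq_getElem S [] hi (by exact_mod_cast hin),
      List.getD_eq_getElem S [] (by omega)]
  have hgj : PySem.List.pyGetD S j [] = S.getD j.toNat [] := by
    rw [PySem.List.pyGetD_eq_getElem S [] hjn (by exact_mod_cast hj),
      List.getD_eq_getElem S [] (by omega)]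
  unfold pvCnt
  rw [hgi, hgj]
  rw [List.countP_eq_length_filter, List.countP_eq_length_filter]
  have hperm : ((pvElems S).filter
        (fun e => decide (i ∈ pvPosts S e ∧ j ∈ pvPosts S e ∧ i < j))).Perm
      ((PySem.Set.ofList (S.getD i.toNat []) : List Int).filter
        (fun e => decide (e ∈ S.getD j.toNat []))) := by
    rw [List.perm_ext_iff_of_nodup]
    · intro e
      simp only [List.mem_filter, decide_eq_true_eq, PySem.Set.mem_ofList,
        pvElems_mem, pvPosts_mem_range S e i hi hin, pvPosts_mem_range S e j hjn hj]
      constructor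
      · rintro ⟨-, h1, h2, -⟩
        exact ⟨h1, h2⟩
      · rintro ⟨h1, h2⟩
        exact ⟨⟨i.toNat, by omega, h1⟩, h1, h2, hij⟩
    · exact ((PySem.Set.nodup_ofList _).filter _)
    · exact ((PySem.Set.nodup_ofList _).filter _)
  exact hperm.length_eq

theorem pvK_mem (S : List (List Int)) (q : Int × Int) :
    q ∈ pvK S ↔ (0 ≤ q.1 ∧ q.1 < q.2 ∧ q.2 < S.length ∧ 1 ≤ pvCnt S q.1 q.2) := by
  obtain ⟨a, b⟩ := q
  constructor
  · intro hq
    obtain ⟨e, he, hp⟩ := List.mem_flatMap.mp hq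
    have hc : 0 < (pvPairs (pvPosts S e)).count (a, b) := List.count_pos_iff.mpr hp
    rw [pvPairs_count _ (pvPosts_pairwise S e)] at hc
    by_cases hcond : (a, b).1 ∈ pvPosts S e ∧ (a, b).2 ∈ pvPosts S e ∧ (a, b).1 < (a, b).2
    · obtain ⟨ha, hb, hab⟩ := hcond
      obtain ⟨k, hk, hka, hek⟩ := (pvPosts_mem S e a).mp ha
      obtain ⟨m, hm, hmb, hem⟩ := (pvPosts_mem S e b).mp hb
      have h0 : 0 ≤ a := by omega
      have hbl : b < (S.length : Int) := by omega
      refine ⟨h0, hab, hbl, ?_⟩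
      show 1 ≤ pvCnt S a b
      have hcnt := pvK_count_eq_cnt S a b h0 hab hbl
      rw [← hcnt]
      exact List.count_pos_iff.mpr (List.mem_flatMap.mpr ⟨e, he, hp⟩)
    · simp [hcond] at hc
  · rintro ⟨h1, h2, h3, h4⟩
    have h4' : 1 ≤ pvCnt S a b := h4
    have hc := pvK_count_eq_cnt S a b h1 h2 h3
    have : 0 < (pvK S).count (a, b) := by omega
    exact List.count_pos_iff.mp this

theorem pvAllPairs_mem (n : Int) (q : Int × Int) :
    q ∈ pvAllPairs n ↔ 0 ≤ q.1 ∧ q.1 < q.2 ∧ q.2 < n := by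
  unfold pvAllPairs
  simp only [List.mem_flatMap, List.mem_map, PySem.List.mem_pyRange_one]
  constructor
  · rintro ⟨i, ⟨h0, hn⟩, j, ⟨hij, hjn⟩, rfl⟩
    exact ⟨h0, by omega, hjn⟩
  · rintro ⟨h0, hij, hjn⟩
    exact ⟨q.1, ⟨h0, by omega⟩, q.2, ⟨by omega, hjn⟩, rfl⟩

theorem pvAllPairs_nodup (n : Int) : (pvAllPairs n).Nodup := by
  unfold pvAllPairs
  rw [List.nodup_flatMap]
  constructor
  · intro i _
    exact (PySem.List.nodup_pyRange_one _ _).map (fun a b h => by simpa using congrArg Prod.snd h)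
  · apply (PySem.List.pairwise_lt_pyRange_one _ _).imp
    intro a b hab q hqa hqb
    simp only [List.mem_map] at hqa hqb
    obtain ⟨x, _, rfl⟩ := hqa
    obtain ⟨y, _, h⟩ := hqb
    have := congrArg Prod.fst h
    simp at this
    omega


-- ---- B-side machinery ----
def pvL (S : List (List Int)) : List (Int × Int) :=
  (PySem.List.enumerate S).flatMap
    (fun p => ((PySem.Set.ofList p.2 : List Int)).map (fun x => (x, p.1)))

def pvPostings (S : List (List Int)) : PySem.Dict Int (List Int) :=
  (PySem.List.enumerate S).foldl (fun d p =>
    ((PySem.Set.ofList p.2 : List Int)).foldl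
      (fun d x => d.modify x [] (fun l => l ++ [p.1])) d)
    PySem.Dict.empty

theorem pvPostings_eq_flat (S : List (List Int)) :
    pvPostings S =
      (pvL S).foldl (fun d q => d.modify q.1 [] (fun l => l ++ [q.2])) PySem.Dict.empty := by
  unfold pvPostings pvL
  rw [List.foldl_flatMap]
  simp only [List.foldl_map]

-- one posting entry per subset that contains e
theorem pvFilter_one (p2 : List Int) (i e : Int) :
    (((PySem.Set.ofList p2 : List Int)).map (fun x => (x, i))).filter (fun q => q.1 == e) =
      if e ∈ p2 then [(e, i)] else [] := by
  rw [List.filter_map]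
  have hcomp : ((fun q : Int × Int => q.1 == e) ∘ (fun x => (x, i))) = (fun x => x == e) := rfl
  rw [hcomp, List.filter_beq]
  by_cases he : e ∈ p2
  · rw [List.count_eq_one_of_mem (PySem.Set.nodup_ofList p2) ((PySem.Set.mem_ofList p2 e).mpr he)]
    simp [he]
  · have h0 : (PySem.Set.ofList p2 : List Int).count e = 0 :=
      List.count_eq_zero_of_not_mem (fun hm => he ((PySem.Set.mem_ofList p2 e).mp hm))
    simp [h0, he]

theorem pvFlatMapIf {α β : Type} (l : List α) (p : α → Bool) (f : α → β) :
    l.flatMap (fun x => if p x then [f x] else []) = (l.filter p).map f := by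
  induction l with
  | nil => simp
  | cons x xs ih =>
    by_cases hx : p x <;> simp [hx, ih]

theorem pvPostings_getD (S : List (List Int)) (e : Int) :
    (pvPostings S).getD e [] = pvPosts S e := by
  rw [pvPostings_eq_flat, PySem.Dict.getD_foldl_modify_append]
  rw [PySem.Dict.getD_empty, List.nil_append]
  unfold pvL pvPosts
  rw [List.filter_flatMap, List.map_flatMap]
  have hone : ∀ a : Int × List Int,
      List.map (fun x : Int × Int => x.2)
        ((((PySem.Set.ofList a.2 : List Int)).map (fun x => (x, a.1))).filter
          (fun q => q.1 == e)) =
        (if (fun p : Int × List Int => decide (e ∈ p.2)) a then [(fun p : Int × List Int => p.1) a] else []) := by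
    intro a
    rw [pvFilter_one a.2 a.1 e]
    by_cases he : e ∈ a.2 <;> simp [he]
  rw [List.flatMap_congr (fun a _ => hone a)]
  exact pvFlatMapIf _ _ _

theorem pvPostings_keys (S : List (List Int)) : (pvPostings S).keys = pvElems S := by
  rw [pvPostings_eq_flat]
  rw [PySem.Dict.keys_foldl_modify_key (pvL S) (fun q => q.1) []
    (fun d q => fun l => l ++ [q.2]) PySem.Dict.empty]
  rw [PySem.Dict.keys_empty, PySem.Set.update_nil_left]
  unfold pvL pvElems
  rw [List.map_flatMap]
  simp [List.map_map, Function.comp_def]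

theorem pvPostings_values (S : List (List Int)) :
    (pvPostings S).values = (pvElems S).map (pvPosts S) := by
  have hnd : (pvPostings S).keys.Nodup := by
    rw [pvPostings_keys]; exact PySem.Set.nodup_ofList _
  rw [PySem.Dict.values_eq_map_keys _ hnd [], pvPostings_keys]
  exact List.map_congr_left (fun e _ => pvPostings_getD S e)

-- the enumerate/slice double loop increments once per index pair a < b
theorem pvInnerAux (rest done : List Int) (pc : PySem.Dict (Int × Int) Int) :
    (PySem.List.enumerate rest (done.length : Int)).foldl (fun pc q =>
        (PySem.List.slice (done ++ rest) (some (q.1 + 1)) none).foldl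
          (fun pc j => pc.insert (q.2, j) (pc.getD (q.2, j) 0 + 1)) pc) pc =
      (pvPairs rest).foldl (fun pc k => pc.insert k (pc.getD k 0 + 1)) pc := by
  induction rest generalizing done pc with
  | nil => simp [PySem.List.enumerate_nil, pvPairs]
  | cons x xs ih =>
    rw [PySem.List.enumerate_cons, List.foldl_cons]
    have hs : PySem.List.slice (done ++ x :: xs) (some ((done.length : Int) + 1)) none = xs := by
      rw [PySem.List.slice_from _ (by omega)]
      have ht : (((done.length : Int)) + 1).toNat = (done ++ [x]).length := by
        simp only [List.length_append, List.length_cons, List.length_nil]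
        omega
      rw [ht, show done ++ x :: xs = (done ++ [x]) ++ xs by simp]
      exact List.drop_left
    rw [hs]
    have hinner : ∀ pc' : PySem.Dict (Int × Int) Int,
        xs.foldl (fun (pc : PySem.Dict (Int × Int) Int) j => pc.insert (x, j) (pc.getD (x, j) 0 + 1)) pc' =
        (xs.map (fun y => (x, y))).foldl (fun pc k => pc.insert k (pc.getD k 0 + 1)) pc' := by
      intro pc'
      rw [List.foldl_map]
    rw [hinner]
    have hcast : (done.length : Int) + 1 = ((done ++ [x]).length : Int) := by simp
    rw [hcast, show done ++ x :: xs = (done ++ [x]) ++ xs from by simp, ih (done ++ [x])]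
    show _ = (pvPairs (x :: xs)).foldl _ pc
    rw [show pvPairs (x :: xs) = xs.map (fun y => (x, y)) ++ pvPairs xs from rfl, List.foldl_append]

theorem pvInner (ids : List Int) (pc : PySem.Dict (Int × Int) Int) :
    (PySem.List.enumerate ids).foldl (fun pc q =>
        (PySem.List.slice ids (some (q.1 + 1)) none).foldl
          (fun pc j => pc.insert (q.2, j) (pc.getD (q.2, j) 0 + 1)) pc) pc =
      (pvPairs ids).foldl (fun pc k => pc.insert k (pc.getD k 0 + 1)) pc := by
  have := pvInnerAux ids [] pc
  simpa using this

-- ---- A-side characterisation ----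
theorem pvA_eq (S : List (List Int)) :
    subset_pairs_with_common_elements S =
      ((pvAllPairs S.length).countP (fun p => decide (3 ≤ pvCnt S p.1 p.2)) : Int) := by
  unfold subset_pairs_with_common_elements
  have hlen : ∀ i j : Int,
      PySem.Set.len (PySem.Set.inter (PySem.Set.ofList (PySem.List.pyGetD S i []))
        (PySem.Set.ofList (PySem.List.pyGetD S j []))) = (pvCnt S i j : Int) := by
    intro i j
    rw [PySem.Set.len_eq]
    have : PySem.Set.inter (PySem.Set.ofList (PySem.List.pyGetD S i []))
        (PySem.Set.ofList (PySem.List.pyGetD S j [])) =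
        ((PySem.Set.ofList (PySem.List.pyGetD S i []) : List Int)).filter
          (fun e => decide (e ∈ PySem.List.pyGetD S j [])) := by
      show List.filter _ _ = _
      apply List.filter_congr
      intro e _
      rw [show ((PySem.Set.ofList (PySem.List.pyGetD S j []) : PySem.Set Int).contains e)
          = decide (e ∈ PySem.List.pyGetD S j []) from by
        by_cases hm : e ∈ PySem.List.pyGetD S j []
        · simp [hm]
        · simp only [hm, decide_false]
          by_contra hb
          exact hm ((PySem.Set.mem_ofList _ e).mp ((PySem.Set.contains_iff _ e).mp
            (by revert hb; cases (PySem.Set.ofList (PySem.List.pyGetD S j []) :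
              PySem.Set Int).contains e <;> simp)))]
    rw [this]
    unfold pvCnt
    rw [List.countP_eq_length_filter]
  have hstep : ∀ i : Int, (fun (count j : Int) =>
        let common : Int :=
          PySem.Set.len (PySem.Set.inter (PySem.Set.ofList (PySem.List.pyGetD S i []))
            (PySem.Set.ofList (PySem.List.pyGetD S j [])))
        if common ≥ 3 then count + 1 else count) =
      (fun count j => if (fun j => decide (3 ≤ pvCnt S i j)) j = true then count + 1 else count) := by
    intro i
    funext count j
    show (if PySem.Set.len _ ≥ 3 then count + 1 else count) = _
    rw [hlen i j]
    by_cases h : 3 ≤ pvCnt S i j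
    · simp [h, show ((3:Int) ≤ (pvCnt S i j : Int)) from by exact_mod_cast h]
    · simp [h, show ¬ ((3:Int) ≤ (pvCnt S i j : Int)) from by exact_mod_cast h]
  rw [show (fun (count i : Int) => (PySem.List.pyRange (i + 1) (S.length : Int) 1).foldl
        (fun count j =>
          let common : Int :=
            PySem.Set.len (PySem.Set.inter (PySem.Set.ofList (PySem.List.pyGetD S i []))
              (PySem.Set.ofList (PySem.List.pyGetD S j [])))
          if common ≥ 3 then count + 1 else count) count)
      = (fun count i => count + ((PySem.List.pyRange (i + 1) (S.length : Int) 1).countP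
          (fun j => decide (3 ≤ pvCnt S i j)) : Int)) from by
    funext count i
    rw [hstep i, PySem.List.foldl_count_if]]
  rw [PySem.List.foldl_add, zero_add]
  unfold pvAllPairs
  rw [List.countP_flatMap, Nat.cast_list_sum, List.map_map]
  congr 1
  apply List.map_congr_left
  intro i _
  simp only [Function.comp_apply, List.countP_map]
  rfl

-- ---- B-side characterisation ----
theorem pvB_eq (S : List (List Int)) :
    subset_pairs_with_common_elements_alt S =
      (((PySem.Set.ofList (pvK S) : List (Int × Int))).countP
        (fun q => decide (3 ≤ (pvK S).count q)) : Int) := by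
  unfold subset_pairs_with_common_elements_alt
  rw [show ((PySem.List.enumerate S).foldl (fun d p =>
      (PySem.Set.ofList p.2).foldl (fun d x => d.modify x [] (fun l => l ++ [p.1])) d)
      PySem.Dict.empty) = pvPostings S from rfl]
  show (List.foldl (fun (count : Int) (c : Int) => if c ≥ 3 then count + 1 else count) 0
    ((pvPostings S).values.foldl (fun (pc : PySem.Dict (Int × Int) Int) ids =>
      (PySem.List.enumerate ids).foldl (fun pc q =>
        (PySem.List.slice ids (some (q.1 + 1)) none).foldl
          (fun pc j => pc.insert (q.2, j) (pc.getD (q.2, j) 0 + 1)) pc) pc)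
      PySem.Dict.empty).values) = _
  have hpc : (pvPostings S).values.foldl (fun (pc : PySem.Dict (Int × Int) Int) ids =>
      (PySem.List.enumerate ids).foldl (fun pc q =>
        (PySem.List.slice ids (some (q.1 + 1)) none).foldl
          (fun pc j => pc.insert (q.2, j) (pc.getD (q.2, j) 0 + 1)) pc) pc)
      PySem.Dict.empty = PySem.Dict.counter (pvK S) := by
    rw [show (pvPostings S).values.foldl (fun (pc : PySem.Dict (Int × Int) Int) ids =>
        (PySem.List.enumerate ids).foldl (fun pc q =>
          (PySem.List.slice ids (some (q.1 + 1)) none).foldl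
            (fun pc j => pc.insert (q.2, j) (pc.getD (q.2, j) 0 + 1)) pc) pc)
        PySem.Dict.empty
        = (pvPostings S).values.foldl (fun (pc : PySem.Dict (Int × Int) Int) ids =>
            (pvPairs ids).foldl (fun pc k => pc.insert k (pc.getD k 0 + 1)) pc)
            PySem.Dict.empty from by
      congr 1
      funext pc ids
      exact pvInner ids pc]
    rw [← List.foldl_flatMap, pvPostings_values, List.flatMap_map]
    exact PySem.Dict.foldl_insert_getD_add_one_eq_counter (pvK S)
  rw [hpc]
  have hvals : (PySem.Dict.counter (pvK S)).values =
      ((PySem.Set.ofList (pvK S) : List (Int × Int))).map (fun k => ((pvK S).count k : Int)) := by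
    show (PySem.Dict.counter (pvK S)).items.map (fun x => x.2) = _
    rw [PySem.Dict.items_counter, List.map_map]
    rfl
  rw [hvals]
  rw [show (fun (count c : Int) => if c ≥ 3 then count + 1 else count)
      = (fun count c => if (fun c : Int => decide (3 ≤ c)) c = true then count + 1 else count) from by
    funext count c
    by_cases h : (3:Int) ≤ c <;> simp [h]]
  rw [PySem.List.foldl_count_if, List.countP_map, zero_add]
  congr 1
  apply List.countP_congr
  intro q _
  simp


-- ===== VERDICT (by name: the statement is the Claim_ definition above) =====
theorem subset_pairs_with_common_elements_spec : Claim_equal_subset_pairs_with_common_elements := by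
  intro S _
  unfold Spec_subset_pairs_with_common_elements
  rw [pvA_eq, pvB_eq]
  congr 1
  rw [List.countP_eq_length_filter, List.countP_eq_length_filter]
  apply List.Perm.length_eq
  rw [List.perm_ext_iff_of_nodup ((pvAllPairs_nodup _).filter _)
    ((PySem.Set.nodup_ofList _).filter _)]
  intro q
  obtain ⟨a, b⟩ := q
  simp only [List.mem_filter, PySem.Set.mem_ofList, decide_eq_true_eq, pvAllPairs_mem, pvK_mem]
  constructor
  · rintro ⟨⟨h1, h2, h3⟩, hc⟩
    have hcnt := pvK_count_eq_cnt S a b h1 h2 h3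
    exact ⟨⟨h1, h2, h3, by omega⟩, by omega⟩
  · rintro ⟨⟨h1, h2, h3, h4⟩, hc⟩
    have hcnt := pvK_count_eq_cnt S a b h1 h2 h3
    exact ⟨⟨h1, h2, h3⟩, by omega⟩
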